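-- pv_equiv track=rewrite | github.com/venkatesh-akhouri/mining-gis-agent | agent2_visualization.py | get_commodity_color_map
-- ===== SOURCE A (Python) =====
-- KNOWN_COMMODITY_COLORS = {
--     "gold":           "#FFD700",
--     "copper":         "#FF6B35",
--     "coal":           "#8D8D8D",
--     "natural gas":    "#00CFFF",
--     "oil":            "#A0522D",
--     "iron":           "#C0392B",
--     "nickel":         "#50E3C2",
--     "zinc":           "#7ED321",
--     "lead":           "#BD10E0",
--     "silver":         "#C0C0C0",
--     "chromium":       "#F5A623",
--     "manganese":      "#9013FE",
--     "bauxite":        "#D0021B",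
--     "lithium":        "#4A90E2",
--     "molybdenum":     "#B8E986",
--     "uranium":        "#39FF14",
--     "tin":            "#FFC0CB",
--     "tungsten":       "#FF4500",
--     "platinum":       "#E8D5B7",
--     "cobalt":         "#0080FF",
--     "phosphate":      "#ADFF2F",
--     "potash":         "#FF69B4",
-- }
--
-- _FALLBACK_PALETTE = [
--     "#FF3CAC", "#784BA0", "#2B86C5", "#43E97B", "#FA8231",
--     "#F9CA24", "#6C5CE7", "#00CEC9", "#E17055", "#FDCB6E",
--     "#A29BFE", "#55EFC4", "#FD79A8", "#E84393", "#00B894",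
-- ]
--
-- def get_commodity_color_map(commodities: list[str]) -> dict[str, str]:
--     """Return a stable commodity → hex-color mapping."""
--     color_map = {}
--     fallback_idx = 0
--     for comm in sorted(commodities):
--         key = comm.lower().strip()
--         if key in KNOWN_COMMODITY_COLORS:
--             color_map[comm] = KNOWN_COMMODITY_COLORS[key]
--         else:
--             color_map[comm] = _FALLBACK_PALETTE[fallback_idx % len(_FALLBACK_PALETTE)]
--             fallback_idx += 1
--     return color_map
-- ===== SOURCE B (Python) =====
-- KNOWN_COMMODITY_COLORS = {
--     "gold":           "#FFD700",
--     "copper":         "#FF6B35",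
--     "coal":           "#8D8D8D",
--     "natural gas":    "#00CFFF",
--     "oil":            "#A0522D",
--     "iron":           "#C0392B",
--     "nickel":         "#50E3C2",
--     "zinc":           "#7ED321",
--     "lead":           "#BD10E0",
--     "silver":         "#C0C0C0",
--     "chromium":       "#F5A623",
--     "manganese":      "#9013FE",
--     "bauxite":        "#D0021B",
--     "lithium":        "#4A90E2",
--     "molybdenum":     "#B8E986",
--     "uranium":        "#39FF14",
--     "tin":            "#FFC0CB",
--     "tungsten":       "#FF4500",
--     "platinum":       "#E8D5B7",
--     "cobalt":         "#0080FF",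
--     "phosphate":      "#ADFF2F",
--     "potash":         "#FF69B4",
-- }
--
-- _FALLBACK_PALETTE = [
--     "#FF3CAC", "#784BA0", "#2B86C5", "#43E97B", "#FA8231",
--     "#F9CA24", "#6C5CE7", "#00CEC9", "#E17055", "#FDCB6E",
--     "#A29BFE", "#55EFC4", "#FD79A8", "#E84393", "#00B894",
-- ]
--
-- def get_commodity_color_map(commodities: list[str]) -> dict[str, str]:
--     """Return a stable commodity -> hex-color mapping (stateless, index-derived)."""
--     s = sorted(commodities)
--     keys = [c.lower().strip() for c in s]
--     rank = {i: j for j, i in enumerate(i for i, k in enumerate(keys)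
--                                        if k not in KNOWN_COMMODITY_COLORS)}
--     return {c: KNOWN_COMMODITY_COLORS[k] if k in KNOWN_COMMODITY_COLORS
--                else _FALLBACK_PALETTE[rank[i] % len(_FALLBACK_PALETTE)]
--             for i, (c, k) in enumerate(zip(s, keys))}
-- ===== Notes on version B (the rewrite author's own statement) =====
-- stated objective: alternative
-- what changed: Replaces A's stateful loop with a mutable fallback counter by a stateless decomposition: a position-to-rank dict built once over the unknown positions, then a dict comprehension over enumerate(zip(sorted, keys)) that looks each fallback index up by position.
import Mathlib
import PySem

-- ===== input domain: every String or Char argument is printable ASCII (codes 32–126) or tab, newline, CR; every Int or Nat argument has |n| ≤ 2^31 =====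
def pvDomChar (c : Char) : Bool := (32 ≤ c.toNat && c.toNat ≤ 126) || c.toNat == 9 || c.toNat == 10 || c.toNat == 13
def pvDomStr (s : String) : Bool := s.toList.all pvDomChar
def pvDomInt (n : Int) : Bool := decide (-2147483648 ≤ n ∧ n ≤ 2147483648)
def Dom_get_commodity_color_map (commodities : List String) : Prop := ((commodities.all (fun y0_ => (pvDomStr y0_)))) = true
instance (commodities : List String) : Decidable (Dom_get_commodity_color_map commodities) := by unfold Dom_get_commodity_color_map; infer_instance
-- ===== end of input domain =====

-- B replaces A's mutable fallback counter by a stateless dict comprehension: a position→rank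
-- dict over the unknown positions supplies each fallback index (objective: alternative decomposition).

-- ===== PORT A =====
def pvKnownColors : PySem.Dict String String := PySem.Dict.ofList [
  ("gold", "#FFD700"), ("copper", "#FF6B35"), ("coal", "#8D8D8D"),
  ("natural gas", "#00CFFF"), ("oil", "#A0522D"), ("iron", "#C0392B"),
  ("nickel", "#50E3C2"), ("zinc", "#7ED321"), ("lead", "#BD10E0"),
  ("silver", "#C0C0C0"), ("chromium", "#F5A623"), ("manganese", "#9013FE"),
  ("bauxite", "#D0021B"), ("lithium", "#4A90E2"), ("molybdenum", "#B8E986"),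
  ("uranium", "#39FF14"), ("tin", "#FFC0CB"), ("tungsten", "#FF4500"),
  ("platinum", "#E8D5B7"), ("cobalt", "#0080FF"), ("phosphate", "#ADFF2F"),
  ("potash", "#FF69B4")]

def pvFallbackPalette : List String := [
  "#FF3CAC", "#784BA0", "#2B86C5", "#43E97B", "#FA8231",
  "#F9CA24", "#6C5CE7", "#00CEC9", "#E17055", "#FDCB6E",
  "#A29BFE", "#55EFC4", "#FD79A8", "#E84393", "#00B894"]

-- A: one stateful loop over sorted(commodities), carrying (color_map, fallback_idx)
def get_commodity_color_map (commodities : List String) : List (String × String) :=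
  let r := (PySem.List.sorted commodities (fun x => x) false).foldl
    (fun (st : PySem.Dict String String × Int) comm =>
      let key := PySem.Str.strip (PySem.Str.lower comm)
      if pvKnownColors.contains key then
        (st.1.insert comm (pvKnownColors.getD key ""), st.2)
      else
        (st.1.insert comm (PySem.List.pyGetD pvFallbackPalette
            (PySem.Int.mod st.2 (pvFallbackPalette.length : Int)) ""), st.2 + 1))
    (PySem.Dict.empty, 0)
  r.1.items

-- ===== PORT B =====
-- B: rank = {i: j for j, i in enumerate(unknown positions)}; then a dict comprehension over
-- enumerate(zip(s, keys)) looks the fallback index up by position (rank[i] guarded by the membership test)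
def get_commodity_color_map_alt (commodities : List String) : List (String × String) :=
  let s := PySem.List.sorted commodities (fun x => x) false
  let keys := s.map (fun c => PySem.Str.strip (PySem.Str.lower c))
  let rank : PySem.Dict Int Int :=
    (PySem.List.enumerate (((PySem.List.enumerate keys 0).filter
        (fun q => !(pvKnownColors.contains q.2))).map (·.1)) 0).foldl
      (fun d p => d.insert p.2 p.1) PySem.Dict.empty
  ((PySem.List.enumerate (s.zip keys) 0).foldl
    (fun (d : PySem.Dict String String) p =>
      d.insert p.2.1
        (if pvKnownColors.contains p.2.2 then pvKnownColors.getD p.2.2 ""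
         else PySem.List.pyGetD pvFallbackPalette
           (PySem.Int.mod (rank.getD p.1 0) (pvFallbackPalette.length : Int)) ""))
    PySem.Dict.empty).items

-- ===== PRECONDITION & SPEC =====
def Spec_get_commodity_color_map (commodities : List String) (out : List (String × String)) : Prop := out = get_commodity_color_map_alt commodities
instance (commodities : List String) (out : List (String × String)) : Decidable (Spec_get_commodity_color_map commodities out) := by unfold Spec_get_commodity_color_map; infer_instance

-- ===== CLAIM (what is proved, stated in full; the proofs are below) =====
def Claim_equal_get_commodity_color_map : Prop := ∀ (commodities : List String), Dom_get_commodity_color_map commodities → Spec_get_commodity_color_map commodities (get_commodity_color_map commodities)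

-- ===== LEMMAS AND PROOFS =====
def pvKey (c : String) : String := PySem.Str.strip (PySem.Str.lower c)
def pvU (c : String) : Bool := !(pvKnownColors.contains (pvKey c))
def pvVal (c : String) (j : Int) : String :=
  if pvKnownColors.contains (pvKey c) then pvKnownColors.getD (pvKey c) ""
  else PySem.List.pyGetD pvFallbackPalette (PySem.Int.mod j (pvFallbackPalette.length : Int)) ""

-- the common intermediate object: the list of (commodity, color) pairs A inserts, counter started at j
def pvPairs : List String → Int → List (String × String)
  | [], _ => []
  | c :: t, j => (c, pvVal c j) :: pvPairs t (j + if pvU c then 1 else 0)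

theorem pvA_loop_eq (l : List String) (d : PySem.Dict String String) (j : Int) :
    (l.foldl
      (fun (st : PySem.Dict String String × Int) comm =>
        let key := PySem.Str.strip (PySem.Str.lower comm)
        if pvKnownColors.contains key then
          (st.1.insert comm (pvKnownColors.getD key ""), st.2)
        else
          (st.1.insert comm (PySem.List.pyGetD pvFallbackPalette
              (PySem.Int.mod st.2 (pvFallbackPalette.length : Int)) ""), st.2 + 1))
      (d, j)).1
    = (pvPairs l j).foldl (fun d (p : String × String) => d.insert p.1 p.2) d := by
  induction l generalizing d j with
  | nil => rfl
  | cons c t ih =>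
    by_cases h : pvKnownColors.contains (PySem.Str.strip (PySem.Str.lower c)) = true
    · simp [pvPairs, pvVal, pvU, pvKey, List.foldl_cons, h, ih]
    · simp [pvPairs, pvVal, pvU, pvKey, List.foldl_cons, h, ih]

-- the unknown-position list of xs, enumerated from off, ranks enumerated from j,
-- swapped into (position, rank) items: membership of the (k, prefix-count) item
theorem pvMemRank (xs : List String) (k : Nat) (off j : Int)
    (hk : k < xs.length) (hu : pvU xs[k] = true) :
    ((off + (k : Int), j + ((xs.take k).countP pvU : Int)) ∈
      (PySem.List.enumerate (((PySem.List.enumerate (xs.map pvKey) off).filter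
          (fun q => !(pvKnownColors.contains q.2))).map (·.1)) j).map (fun a => (a.2, a.1))) := by
  induction xs generalizing k off j with
  | nil => simp at hk
  | cons x t ih =>
    rw [List.map_cons, PySem.List.enumerate_cons, List.filter_cons]
    by_cases hx : pvU x = true
    · have hx' : (!(pvKnownColors.contains (pvKey x))) = true := hx
      rw [if_pos hx']
      rw [List.map_cons, PySem.List.enumerate_cons, List.map_cons]
      cases k with
      | zero => simp
      | succ k' =>
        have hk' : k' < t.length := by simpa using hk
        have hu' : pvU t[k'] = true := by simpa using hu
        have := ih k' (off + 1) (j + 1) hk' hu'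
        apply List.mem_cons_of_mem
        have harith : (off + ((k' + 1 : Nat) : Int), j + (((x :: t).take (k' + 1)).countP pvU : Int))
            = (off + 1 + (k' : Int), j + 1 + ((t.take k').countP pvU : Int)) := by
          rw [List.take_succ_cons, List.countP_cons, hx]
          simp only [if_true, Prod.mk.injEq]
          constructor <;> push_cast <;> omega
        rw [harith]
        exact this
    · have hx' : ¬ ((!(pvKnownColors.contains (pvKey x))) = true) := hx
      rw [if_neg hx']
      cases k with
      | zero =>
        simp only [List.getElem_cons_zero] at hu
        exact absurd hu hx
      | succ k' =>
        have hk' : k' < t.length := by simpa using hk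
        have hu' : pvU t[k'] = true := by simpa using hu
        have := ih k' (off + 1) j hk' hu'
        have harith : (off + ((k' + 1 : Nat) : Int), j + (((x :: t).take (k' + 1)).countP pvU : Int))
            = (off + 1 + (k' : Int), j + ((t.take k').countP pvU : Int)) := by
          rw [List.take_succ_cons, List.countP_cons]
          rw [Bool.not_eq_true] at hx
          rw [hx]
          simp only [Bool.false_eq_true, if_false, add_zero, Prod.mk.injEq]
          constructor <;> push_cast <;> omega
        rw [harith]
        exact this

-- the rank dict of B: lookup at an unknown position k gives the number of unknown positions before k
theorem pvRank_getD (xs : List String) (k : Nat) (hk : k < xs.length) (hu : pvU xs[k] = true) :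
    ((PySem.List.enumerate (((PySem.List.enumerate (xs.map pvKey) 0).filter
          (fun q => !(pvKnownColors.contains q.2))).map (·.1)) 0).foldl
        (fun (d : PySem.Dict Int Int) p => d.insert p.2 p.1) PySem.Dict.empty).getD (k : Int) 0
      = ((xs.take k).countP pvU : Int) := by
  set P : List Int := ((PySem.List.enumerate (xs.map pvKey) 0).filter
      (fun q => !(pvKnownColors.contains q.2))).map (·.1) with hP
  have hPnd : P.Nodup := by
    have h1 := PySem.List.pairwise_lt_enumerate (xs := xs.map pvKey) (s := 0)
    have h2 := h1.filter (fun q => !(pvKnownColors.contains q.2))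
    have h3 : P.Pairwise (· < ·) := List.Pairwise.map _ (fun a b h => h) h2
    exact List.Pairwise.imp (fun h => ne_of_lt h) h3
  have hfresh : ∀ a ∈ PySem.List.enumerate P 0, PySem.Dict.empty.contains (κ := Int) (ν := Int) a.2 = false := by
    intro a _; exact PySem.Dict.contains_empty a.2
  have hkeys : ((PySem.List.enumerate P 0).map (·.2)).Nodup := by
    rw [PySem.List.map_snd_enumerate]; exact hPnd
  have hitems := PySem.Dict.items_foldl_insert_fresh (l := PySem.List.enumerate P 0)
      (k := (·.2)) (v := (·.1)) (d := PySem.Dict.empty) hfresh hkeys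
  have hmem := pvMemRank xs k 0 0 hk hu
  rw [← hP] at hmem
  simp only [zero_add] at hmem
  have hmem' : ((k : Int), ((xs.take k).countP pvU : Int)) ∈
      ((PySem.List.enumerate P 0).foldl
        (fun (d : PySem.Dict Int Int) p => d.insert p.2 p.1) PySem.Dict.empty).items := by
    rw [hitems]
    simpa [PySem.Dict.empty] using hmem
  have hnd : ((PySem.List.enumerate P 0).foldl
      (fun (d : PySem.Dict Int Int) p => d.insert p.2 p.1) PySem.Dict.empty).keys.Nodup :=
    PySem.Dict.nodup_keys_foldl_insert_key (PySem.List.enumerate P 0) (fun p => p.2)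
      (fun _ p => p.1) PySem.Dict.empty PySem.Dict.nodup_keys_empty
  exact PySem.Dict.getD_of_mem_items _ hmem' hnd 0

-- B's comprehension loop over the tail t at offset pre.length, with any rank dict that is
-- correct on the unknown positions of t, folds exactly A's pair list
theorem pvB_loop_eq (t : List String) (pre : List String) (d : PySem.Dict String String)
    (rank : PySem.Dict Int Int)
    (H : ∀ (k : Nat) (hk : k < t.length), pvU (t[k]'hk) = true →
      rank.getD ((pre.length : Int) + k) 0
        = ((pre.countP pvU : Nat) : Int) + ((t.take k).countP pvU : Int)) :
    ((PySem.List.enumerate (t.zip (t.map pvKey)) (pre.length : Int)).foldl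
      (fun (d : PySem.Dict String String) p =>
        d.insert p.2.1
          (if pvKnownColors.contains p.2.2 then pvKnownColors.getD p.2.2 ""
           else PySem.List.pyGetD pvFallbackPalette
             (PySem.Int.mod (rank.getD p.1 0) (pvFallbackPalette.length : Int)) ""))
      d)
    = (pvPairs t ((pre.countP pvU : Nat) : Int)).foldl
        (fun d (p : String × String) => d.insert p.1 p.2) d := by
  induction t generalizing pre d with
  | nil => rfl
  | cons c t ih =>
    rw [List.map_cons, List.zip_cons_cons, PySem.List.enumerate_cons, List.foldl_cons]
    have hval : (if pvKnownColors.contains (pvKey c) then pvKnownColors.getD (pvKey c) ""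
           else PySem.List.pyGetD pvFallbackPalette
             (PySem.Int.mod (rank.getD (pre.length : Int) 0) (pvFallbackPalette.length : Int)) "")
        = pvVal c ((pre.countP pvU : Nat) : Int) := by
      by_cases hc : pvKnownColors.contains (pvKey c) = true
      · rw [if_pos hc, pvVal, if_pos hc]
      · have hu : pvU c = true := by simp [pvU, hc]
        have h0 := H 0 (by simp) (by simpa using hu)
        simp only [Nat.cast_zero, add_zero, List.take_zero, List.countP_nil,
          Nat.cast_zero] at h0
        rw [if_neg hc, pvVal, if_neg hc, h0]
    have H' : ∀ (k : Nat) (hk : k < t.length), pvU (t[k]'hk) = true →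
        rank.getD (((pre ++ [c]).length : Int) + k) 0
          = (((pre ++ [c]).countP pvU : Nat) : Int) + ((t.take k).countP pvU : Int) := by
      intro k hk hu
      have := H (k + 1) (by simpa using Nat.succ_lt_succ hk) (by simpa using hu)
      have e1 : ((pre.length : Int) + ((k + 1 : Nat) : Int)) = (((pre ++ [c]).length : Int) + k) := by
        simp; omega
      rw [e1] at this
      rw [this]
      rw [List.take_succ_cons, List.countP_cons, List.countP_append, List.countP_cons,
        List.countP_nil]
      by_cases hc : pvU c = true
      · rw [hc]; push_cast; ring
      · rw [Bool.not_eq_true] at hc; rw [hc]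
        simp only [Bool.false_eq_true, if_false]; push_cast; ring
    have := ih (pre ++ [c]) (d.insert c (pvVal c ((pre.countP pvU : Nat) : Int))) H'
    have e2 : ((pre ++ [c]).length : Int) = (pre.length : Int) + 1 := by simp
    rw [e2] at this
    have e3 : (((pre ++ [c]).countP pvU : Nat) : Int)
        = ((pre.countP pvU : Nat) : Int) + (if pvU c then 1 else 0) := by
      rcases Bool.eq_false_or_eq_true (pvU c) with h | h <;>
        simp only [List.countP_append, List.countP_cons, List.countP_nil, h, if_true, if_false,
          Bool.false_eq_true, Nat.cast_add, Nat.cast_zero, Nat.cast_one] <;> omega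
    rw [e3] at this
    simp only [hval, pvPairs, List.foldl_cons]
    exact this

-- ===== VERDICT (by name: the statement is the Claim_ definition above) =====
theorem get_commodity_color_map_spec : Claim_equal_get_commodity_color_map := by
  intro commodities _
  unfold Spec_get_commodity_color_map get_commodity_color_map get_commodity_color_map_alt
  have hA := pvA_loop_eq (PySem.List.sorted commodities (fun x => x) false) PySem.Dict.empty 0
  have hB := pvB_loop_eq (PySem.List.sorted commodities (fun x => x) false) [] PySem.Dict.empty
    ((PySem.List.enumerate ((((PySem.List.enumerate
        ((PySem.List.sorted commodities (fun x => x) false).map pvKey) 0)).filter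
        (fun q => !(pvKnownColors.contains q.2))).map (·.1)) 0).foldl
      (fun (d : PySem.Dict Int Int) p => d.insert p.2 p.1) PySem.Dict.empty)
    (by
      intro k hk hu
      simp only [List.length_nil, Nat.cast_zero, zero_add, List.countP_nil]
      exact pvRank_getD (PySem.List.sorted commodities (fun x => x) false) k hk hu)
  simp only [List.length_nil, Nat.cast_zero, List.countP_nil] at hB
  simp only []
  rw [hA, ← hB]
  rfl
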